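-- pv_equiv track=rewrite | github.com/ankitasingh001/Coding | CodeChef/Competition/TTUPLE.py | allcheck
-- ===== SOURCE A (Python) =====
-- def allcheck(a,b,c,p,q,r,stop=0):
--     if((p==a)and q==b):
--         return 1
--     if((p!=a)and (q!=b)):
--         if (p-a)==(q-b):
--             return 2
--         if (p!=0) and (q!=0):
--             if((a%p ==0) and (b%q==0) and (a//p == b //q)):
--                 return 2
--     if(stop ==0):
--         if((b!=0)and (a!=0)):
--             return min(allcheck(c,a-b+q,b,r,p,b,1),allcheck(c,b-a+p,a,r,q,a,1),allcheck(c,(a//b)*q,b,r,p,b,1),allcheck(c,(b//a)*p,a,r,q,a,1))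
--         elif(a!=0):
--             return min(allcheck(c,a-b+q,b,r,p,b,1),allcheck(c,b-a+p,a,r,q,a,1),allcheck(c,(b//a)*p,a,r,q,a,1))
--         elif(b!=0):
--             return min(allcheck(c,a-b+q,b,r,p,b,1),allcheck(c,b-a+p,a,r,q,a,1),allcheck(c,(a//b)*q,b,r,p,b,1))
--         else:
--             return min(allcheck(c,a-b+q,b,r,p,b,1),allcheck(c,b-a+p,a,r,q,a,1))
--     return 3
-- ===== SOURCE B (Python) =====
-- def allcheck(a, b, c, p, q, r, stop=0):
--     # (P,Q) reaches (A,B) exactly iff they are equal already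
--     def exact(A, B, P, Q):
--         return P == A and Q == B
--
--     # one uniform step (same added delta, or same integer multiplier) turns (P,Q) into (A,B)
--     def step(A, B, P, Q):
--         if P == A or Q == B:
--             return False
--         if A - P == B - Q:
--             return True
--         return P != 0 and Q != 0 and A % P == 0 and (A // P) * Q == B
--
--     if exact(a, b, p, q):
--         return 1
--     if step(a, b, p, q):
--         return 2
--     if stop != 0:
--         return 3
--     # successor states all share first component c and target-first r; only (x, P) vary
--     succ = [(a - b + q, p), (b - a + p, q)]
--     if b != 0:
--         succ.append((a // b * q, p))
--     if a != 0:
--         succ.append((b // a * p, q))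
--     if r == c and any(P == x for x, P in succ):
--         return 1
--     if r != c and any(step(c, x, r, P) for x, P in succ):
--         return 2
--     return 3
-- ===== Notes on version B (the rewrite author's own statement) =====
-- stated objective: alternative
-- what changed: A's bounded recursion with min over four stop=1 calls is replaced by two boolean predicates exact/step (the multiplicative test rewritten algebraically to a%p==0 and (a//p)*q==b) and a staged scan over successor (x,P) pairs: first a scan for an exact hit returning 1, then a scan for a one-step hit returning 2; no recursion and no min remain.
import Mathlib
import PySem

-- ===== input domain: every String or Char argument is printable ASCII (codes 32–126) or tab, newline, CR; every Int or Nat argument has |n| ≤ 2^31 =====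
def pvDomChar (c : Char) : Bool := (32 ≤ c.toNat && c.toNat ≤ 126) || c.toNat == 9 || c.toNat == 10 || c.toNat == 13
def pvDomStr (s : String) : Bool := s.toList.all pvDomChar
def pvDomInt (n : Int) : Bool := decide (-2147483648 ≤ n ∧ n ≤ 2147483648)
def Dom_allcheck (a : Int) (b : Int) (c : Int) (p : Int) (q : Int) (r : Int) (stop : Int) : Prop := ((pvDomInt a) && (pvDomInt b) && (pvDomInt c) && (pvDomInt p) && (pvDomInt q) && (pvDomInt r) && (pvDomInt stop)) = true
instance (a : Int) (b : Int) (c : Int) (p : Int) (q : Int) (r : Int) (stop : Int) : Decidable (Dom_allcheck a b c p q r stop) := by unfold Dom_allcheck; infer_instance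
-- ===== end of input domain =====

-- B: recursion and min replaced by boolean exact/step predicates and a staged scan of successor pairs (objective: alternative).


-- ===== PORT A =====
def allcheck (a : Int) (b : Int) (c : Int) (p : Int) (q : Int) (r : Int) (stop : Int) : Int :=
  if p = a ∧ q = b then 1
  else if (p ≠ a ∧ q ≠ b) ∧ p - a = q - b then 2
  else if (p ≠ a ∧ q ≠ b) ∧ (p ≠ 0 ∧ q ≠ 0) ∧
      PySem.Int.mod a p = 0 ∧ PySem.Int.mod b q = 0 ∧
      PySem.Int.floordiv a p = PySem.Int.floordiv b q then 2
  else if stop = 0 then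
    if b ≠ 0 ∧ a ≠ 0 then
      min (min (min (allcheck c (a - b + q) b r p b 1) (allcheck c (b - a + p) a r q a 1))
          (allcheck c (PySem.Int.floordiv a b * q) b r p b 1))
        (allcheck c (PySem.Int.floordiv b a * p) a r q a 1)
    else if a ≠ 0 then
      min (min (allcheck c (a - b + q) b r p b 1) (allcheck c (b - a + p) a r q a 1))
        (allcheck c (PySem.Int.floordiv b a * p) a r q a 1)
    else if b ≠ 0 then
      min (min (allcheck c (a - b + q) b r p b 1) (allcheck c (b - a + p) a r q a 1))
        (allcheck c (PySem.Int.floordiv a b * q) b r p b 1)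
    else
      min (allcheck c (a - b + q) b r p b 1) (allcheck c (b - a + p) a r q a 1)
  else 3
termination_by (if stop = 0 then 1 else 0)
decreasing_by all_goals simp_all

-- ===== PORT B =====
-- Source B's predicate `step`: one uniform added delta or one integer multiplier turns (P,Q) into (A,B)
def stepB (A : Int) (B : Int) (P : Int) (Q : Int) : Bool :=
  if P = A ∨ Q = B then false
  else if A - P = B - Q then true
  else decide (P ≠ 0 ∧ Q ≠ 0 ∧ PySem.Int.mod A P = 0 ∧ PySem.Int.floordiv A P * Q = B)

def allcheck_alt (a : Int) (b : Int) (c : Int) (p : Int) (q : Int) (r : Int) (stop : Int) : Int :=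
  if p = a ∧ q = b then 1
  else if stepB a b p q then 2
  else if stop ≠ 0 then 3
  else
    let succ : List (Int × Int) :=
      [(a - b + q, p), (b - a + p, q)] ++
      (if b ≠ 0 then [(PySem.Int.floordiv a b * q, p)] else []) ++
      (if a ≠ 0 then [(PySem.Int.floordiv b a * p, q)] else [])
    if r = c ∧ succ.any (fun t => decide (t.2 = t.1)) then 1
    else if r ≠ c ∧ succ.any (fun t => stepB c t.1 r t.2) then 2
    else 3

-- ===== PRECONDITION & SPEC =====
def Spec_allcheck (a : Int) (b : Int) (c : Int) (p : Int) (q : Int) (r : Int) (stop : Int) (out : Int) : Prop := out = allcheck_alt a b c p q r stop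
instance (a : Int) (b : Int) (c : Int) (p : Int) (q : Int) (r : Int) (stop : Int) (out : Int) : Decidable (Spec_allcheck a b c p q r stop out) := by unfold Spec_allcheck; infer_instance

-- ===== CLAIM (what is proved, stated in full; the proofs are below) =====
def Claim_equal_allcheck : Prop := ∀ (a : Int) (b : Int) (c : Int) (p : Int) (q : Int) (r : Int) (stop : Int), Dom_allcheck a b c p q r stop → Spec_allcheck a b c p q r stop (allcheck a b c p q r stop)

-- ===== LEMMAS AND PROOFS =====

-- A's divisibility test (both remainders zero, equal quotients) ≡ B's algebraic form (first remainder zero, quotient times q hits b)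
theorem mul_equiv (a b p q : Int) (hq : q ≠ 0) :
    (PySem.Int.mod a p = 0 ∧ PySem.Int.mod b q = 0 ∧
      PySem.Int.floordiv a p = PySem.Int.floordiv b q) ↔
    (PySem.Int.mod a p = 0 ∧ PySem.Int.floordiv a p * q = b) := by
  constructor
  · rintro ⟨h1, h2, h3⟩
    refine ⟨h1, ?_⟩
    have := PySem.Int.floordiv_mul_add_mod b q
    rw [h3]; omega
  · rintro ⟨h1, h2⟩
    have hd : PySem.Int.floordiv b q = PySem.Int.floordiv a p := by
      have : b = PySem.Int.floordiv a p * q := h2.symm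
      simp [PySem.Int.floordiv, this, Int.mul_fdiv_cancel _ hq]
    have hm : PySem.Int.mod b q = 0 := by
      have := PySem.Int.floordiv_mul_add_mod b q
      rw [hd] at this; omega
    exact ⟨h1, hm, hd.symm⟩

theorem stepB_ne {A B P Q : Int} (h : stepB A B P Q = true) : P ≠ A ∧ Q ≠ B := by
  unfold stepB at h
  split_ifs at h with h1 h2
  · push_neg at h1; exact h1
  · push_neg at h1; exact h1

-- B's step predicate ≡ the disjunction of A's two "2" conditions
theorem stepB_iff (a b p q : Int) :
    stepB a b p q = true ↔
      ((p ≠ a ∧ q ≠ b) ∧ p - a = q - b) ∨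
      ((p ≠ a ∧ q ≠ b) ∧ (p ≠ 0 ∧ q ≠ 0) ∧ PySem.Int.mod a p = 0 ∧
        PySem.Int.mod b q = 0 ∧ PySem.Int.floordiv a p = PySem.Int.floordiv b q) := by
  unfold stepB
  by_cases h1 : p = a ∨ q = b
  · rw [if_pos h1]
    constructor
    · intro h; simp at h
    · rintro (⟨⟨hp, hq⟩, -⟩ | ⟨⟨hp, hq⟩, -⟩) <;> tauto
  · rw [if_neg h1]
    push_neg at h1
    by_cases h2 : a - p = b - q
    · rw [if_pos h2]
      constructor
      · intro _; exact Or.inl ⟨h1, by omega⟩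
      · intro _; rfl
    · rw [if_neg h2]
      simp only [decide_eq_true_eq]
      constructor
      · rintro ⟨h0p, h0q, hm⟩
        exact Or.inr ⟨h1, ⟨h0p, h0q⟩, (mul_equiv a b p q h0q).mpr hm⟩
      · rintro (⟨-, hadd⟩ | ⟨-, ⟨h0p, h0q⟩, hm⟩)
        · omega
        · have hb := (mul_equiv a b p q h0q).mp hm
          exact ⟨h0p, h0q, hb.1, hb.2⟩

-- the base-block tree of A, expressed with B's predicates
theorem base_char (a b p q : Int) (x : Int) :
    (if p = a ∧ q = b then (1:Int)
     else if (p ≠ a ∧ q ≠ b) ∧ p - a = q - b then 2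
     else if (p ≠ a ∧ q ≠ b) ∧ (p ≠ 0 ∧ q ≠ 0) ∧
        PySem.Int.mod a p = 0 ∧ PySem.Int.mod b q = 0 ∧
        PySem.Int.floordiv a p = PySem.Int.floordiv b q then 2
     else x) =
    (if p = a ∧ q = b then 1 else if stepB a b p q then 2 else x) := by
  by_cases he : p = a ∧ q = b
  · rw [if_pos he, if_pos he]
  · rw [if_neg he, if_neg he]
    by_cases hs : stepB a b p q = true
    · rw [if_pos hs]
      rcases (stepB_iff a b p q).mp hs with h | h
      · rw [if_pos h]
      · by_cases hadd : (p ≠ a ∧ q ≠ b) ∧ p - a = q - b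
        · rw [if_pos hadd]
        · rw [if_neg hadd, if_pos h]
    · have hiff := stepB_iff a b p q
      rw [if_neg (fun h => hs (hiff.mpr (Or.inl h))),
        if_neg (fun h => hs (hiff.mpr (Or.inr h))), if_neg hs]

-- proof-side: the value of one base-block judgement, and the staged scan
def judge (A B P Q : Int) : Int :=
  if P = A ∧ Q = B then 1 else if stepB A B P Q then 2 else 3

def staged (c r : Int) (l : List (Int × Int)) : Int :=
  if r = c ∧ l.any (fun t => decide (t.2 = t.1)) then 1
  else if r ≠ c ∧ l.any (fun t => stepB c t.1 r t.2) then 2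
  else 3

theorem allcheck_one_eq_judge (a b c p q r : Int) :
    allcheck a b c p q r 1 = judge a b p q := by
  rw [allcheck]
  unfold judge
  rw [base_char]
  norm_num

theorem judge_eq_staged (c r x P : Int) : judge c x r P = staged c r [(x, P)] := by
  unfold judge staged
  simp only [List.any_cons, List.any_nil, Bool.or_false, decide_eq_true_eq]
  by_cases he : r = c ∧ P = x
  · rw [if_pos he, if_pos he]
  · rw [if_neg he, if_neg he]
    by_cases hs : stepB c x r P = true
    · rw [if_pos hs, if_pos ⟨(stepB_ne hs).1, hs⟩]
    · rw [if_neg hs, if_neg (fun h => hs h.2)]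

theorem staged_append (c r : Int) (l1 l2 : List (Int × Int)) :
    min (staged c r l1) (staged c r l2) = staged c r (l1 ++ l2) := by
  unfold staged
  simp only [List.any_append, Bool.or_eq_true, ne_eq]
  by_cases hrc : r = c
  · simp only [hrc, true_and, not_true_eq_false, false_and, if_false]
    by_cases h1 : (List.any l1 fun t => decide (t.2 = t.1)) = true <;>
    by_cases h2 : (List.any l2 fun t => decide (t.2 = t.1)) = true <;>
      simp [h1, h2]
  · simp only [hrc, false_and, if_false, not_false_eq_true, true_and]
    by_cases h1 : (List.any l1 fun t => stepB c t.1 r t.2) = true <;>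
    by_cases h2 : (List.any l2 fun t => stepB c t.1 r t.2) = true <;>
      simp [h1, h2]

theorem allcheck_eq_alt (a b c p q r stop : Int) :
    allcheck a b c p q r stop = allcheck_alt a b c p q r stop := by
  rw [allcheck]
  unfold allcheck_alt
  rw [base_char]
  by_cases he : p = a ∧ q = b
  · rw [if_pos he, if_pos he]
  · rw [if_neg he, if_neg he]
    by_cases hs : stepB a b p q = true
    · rw [if_pos hs, if_pos hs]
    · rw [if_neg hs, if_neg hs]
      by_cases h0 : stop = 0
      · rw [if_pos h0, if_neg (by omega : ¬stop ≠ 0)]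
        simp only [allcheck_one_eq_judge, judge_eq_staged]
        by_cases hb : b = 0 <;> by_cases ha : a = 0 <;>
          simp only [hb, ha, ne_eq, not_true_eq_false, not_false_eq_true, and_true, and_false,
            false_and, true_and, if_true, if_false, and_self, List.append_nil] <;>
          simp only [staged_append] <;> simp [staged]
      · rw [if_neg h0, if_pos h0]

-- ===== VERDICT (by name: the statement is the Claim_ definition above) =====
theorem allcheck_spec : Claim_equal_allcheck := by
  intro a b c p q r stop _
  exact allcheck_eq_alt a b c p q r stop
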